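-- pv_equiv track=rewrite | github.com/bheil123/crossplay | crossplay/lookahead_3ply.py | _limit_blanks
-- ===== SOURCE A (Python) =====
-- def _limit_blanks(tiles: str, max_blanks: int = 2) -> str:
--     """Limit blanks in tile string to avoid exponential blowup."""
--     result = []
--     blank_count = 0
--     for t in tiles:
--         if t == '?':
--             if blank_count < max_blanks:
--                 result.append(t)
--                 blank_count += 1
--         else:
--             result.append(t)
--     return ''.join(result)
-- ===== SOURCE B (Python) =====
-- def _limit_blanks(tiles: str, max_blanks: int = 2) -> str:
--     """Keep non-'?' tiles and only the first max_blanks '?' tiles (index-based two-pass)."""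
--     blank_indices = [i for i, t in enumerate(tiles) if t == '?']
--     drop = set(blank_indices[max(max_blanks, 0):])
--     return ''.join(t for i, t in enumerate(tiles) if i not in drop)
-- ===== Notes on version B (the rewrite author's own statement) =====
-- stated objective: alternative
-- what changed: Replaces A's single pass with an inline blank counter by a two-pass index approach: collect the indices of '?' characters, drop those past the first max(max_blanks,0), and filter the string by index membership.
import Mathlib
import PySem

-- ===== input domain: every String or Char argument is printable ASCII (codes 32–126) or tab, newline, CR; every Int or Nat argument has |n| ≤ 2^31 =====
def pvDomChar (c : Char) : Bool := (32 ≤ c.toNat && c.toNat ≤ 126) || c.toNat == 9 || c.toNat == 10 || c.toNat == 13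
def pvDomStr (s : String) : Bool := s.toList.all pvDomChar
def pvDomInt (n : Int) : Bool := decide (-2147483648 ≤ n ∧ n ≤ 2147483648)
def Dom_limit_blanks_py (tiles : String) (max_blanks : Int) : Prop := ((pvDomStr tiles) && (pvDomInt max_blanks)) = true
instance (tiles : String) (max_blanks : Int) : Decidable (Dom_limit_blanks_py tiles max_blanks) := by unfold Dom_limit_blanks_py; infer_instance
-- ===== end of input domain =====

-- B replaces A's counter-maintaining single pass by a blank-index collection pass plus an
-- index-membership filtering pass (objective: alternative decomposition; same results).

-- ===== PORT A =====
-- literal port of A: fold over the characters carrying (result, blank_count)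
def limit_blanks_py (tiles : String) (max_blanks : Int) : String :=
  let st := tiles.toList.foldl
    (fun (st : List Char × Int) t =>
      if t = '?' then
        if st.2 < max_blanks then (st.1 ++ [t], st.2 + 1) else st
      else (st.1 ++ [t], st.2))
    ([], 0)
  String.ofList st.1

-- ===== PORT B =====
-- helper of B: the indices of '?' characters, enumerating from start n
def pvBlanks (n : Int) (l : List Char) : List Int :=
  (PySem.List.enumerate l n).filterMap (fun p => if p.2 = '?' then some p.1 else none)

def limit_blanks_py_alt (tiles : String) (max_blanks : Int) : String :=
  let l := tiles.toList
  let blank_indices := pvBlanks 0 l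
  -- blank_indices[max(max_blanks,0):] : a nonnegative-start slice is List.drop
  let drop : PySem.Set Int := PySem.Set.ofList (blank_indices.drop (max max_blanks 0).toNat)
  String.ofList (((PySem.List.enumerate l 0).filter (fun p => !(PySem.Set.contains drop p.1))).map Prod.snd)

-- ===== PRECONDITION & SPEC =====
def Spec_limit_blanks_py (tiles : String) (max_blanks : Int) (out : String) : Prop := out = limit_blanks_py_alt tiles max_blanks
instance (tiles : String) (max_blanks : Int) (out : String) : Decidable (Spec_limit_blanks_py tiles max_blanks out) := by unfold Spec_limit_blanks_py; infer_instance

-- ===== CLAIM (what is proved, stated in full; the proofs are below) =====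
def Claim_equal_limit_blanks_py : Prop := ∀ (tiles : String) (max_blanks : Int), Dom_limit_blanks_py tiles max_blanks → Spec_limit_blanks_py tiles max_blanks (limit_blanks_py tiles max_blanks)

-- ===== LEMMAS AND PROOFS =====

-- common reference function: keep characters, with a Nat budget of blanks still allowed
def pvKeep : List Char → Nat → List Char
  | [], _ => []
  | c :: rest, k =>
    if c = '?' then
      match k with
      | 0 => pvKeep rest 0
      | j + 1 => c :: pvKeep rest j
    else c :: pvKeep rest k

-- A's fold equals pvKeep with budget (max_blanks - count).toNat
theorem pvA_eq_keep (mb : Int) (l : List Char) : ∀ (acc : List Char) (cnt : Int),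
    (l.foldl (fun (st : List Char × Int) t =>
      if t = '?' then
        if st.2 < mb then (st.1 ++ [t], st.2 + 1) else st
      else (st.1 ++ [t], st.2)) (acc, cnt)).1 = acc ++ pvKeep l (mb - cnt).toNat := by
  induction l with
  | nil => intro acc cnt; simp [pvKeep]
  | cons c rest ih =>
    intro acc cnt
    by_cases hc : c = '?'
    · subst hc
      by_cases hlt : cnt < mb
      · have hk : (mb - cnt).toNat = (mb - (cnt + 1)).toNat + 1 := by omega
        simp [hlt, ih, pvKeep, hk]
      · have hk : (mb - cnt).toNat = 0 := by omega
        have hu : pvKeep ('?' :: rest) 0 = pvKeep rest 0 := by simp [pvKeep]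
        simp [hlt, ih, hk, hu]
    · simp [hc, ih, pvKeep]

theorem pvBlanks_ge (l : List Char) (n x : Int) (h : x ∈ pvBlanks n l) : n ≤ x := by
  rcases List.mem_filterMap.1 h with ⟨p, hp, hf⟩
  rcases (PySem.List.mem_enumerate_iff l n p).1 hp with ⟨k, hk, rfl⟩
  by_cases hq : (n + (k : Int), l[k]).2 = '?'
  · rw [if_pos hq] at hf
    have : n + (k : Int) = x := by simpa using hf
    omega
  · rw [if_neg hq] at hf; cases hf

-- B's filter equals pvKeep with the same budget (generalized over the start index)
theorem pvB_eq_keep (l : List Char) : ∀ (n : Int) (k : Nat),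
    ((PySem.List.enumerate l n).filter
        (fun p => !(PySem.Set.contains (PySem.Set.ofList ((pvBlanks n l).drop k)) p.1))).map Prod.snd
      = pvKeep l k := by
  induction l with
  | nil => intro n k; simp [PySem.List.enumerate_nil, pvKeep]
  | cons c rest ih =>
    intro n k
    have hge : ∀ p ∈ PySem.List.enumerate rest (n + 1), p.1 ≠ n := by
      intro p hp
      rcases (PySem.List.mem_enumerate_iff rest (n + 1) p).1 hp with ⟨j, hj, rfl⟩
      simp; omega
    by_cases hc : c = '?'
    · have hb : pvBlanks n (c :: rest) = n :: pvBlanks (n + 1) rest := by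
        simp [pvBlanks, PySem.List.enumerate_cons, hc]
      cases k with
      | zero =>
        have hmem : n ∈ pvBlanks n (c :: rest) := by simp [hb]
        have hcongr : ∀ p ∈ PySem.List.enumerate rest (n + 1),
            (!(PySem.Set.contains (PySem.Set.ofList ((pvBlanks n (c :: rest)).drop 0)) p.1))
              = (!(PySem.Set.contains (PySem.Set.ofList ((pvBlanks (n + 1) rest).drop 0)) p.1)) := by
          intro p hp
          simp [hb, PySem.Set.mem_ofList, hge p hp]
        rw [PySem.List.enumerate_cons,
          List.filter_cons_of_neg (by simp [PySem.Set.mem_ofList, hmem]),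
          List.filter_congr hcongr, ih (n + 1) 0]
        simp [pvKeep, hc]
      | succ j =>
        have hdrop : (pvBlanks n (c :: rest)).drop (j + 1) = (pvBlanks (n + 1) rest).drop j := by
          simp [hb]
        have hnot : n ∉ (pvBlanks n (c :: rest)).drop (j + 1) := by
          rw [hdrop]; intro hm
          have := pvBlanks_ge rest (n + 1) n (List.mem_of_mem_drop hm); omega
        have hcongr : ∀ p ∈ PySem.List.enumerate rest (n + 1),
            (!(PySem.Set.contains (PySem.Set.ofList ((pvBlanks n (c :: rest)).drop (j + 1))) p.1))
              = (!(PySem.Set.contains (PySem.Set.ofList ((pvBlanks (n + 1) rest).drop j)) p.1)) := by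
          intro p hp; rw [hdrop]
        rw [PySem.List.enumerate_cons,
          List.filter_cons_of_pos (by simp [PySem.Set.mem_ofList, hnot]),
          List.map_cons, List.filter_congr hcongr, ih (n + 1) j]
        simp [pvKeep, hc]
    · have hb : pvBlanks n (c :: rest) = pvBlanks (n + 1) rest := by
        simp [pvBlanks, PySem.List.enumerate_cons, hc]
      have hnot : n ∉ (pvBlanks n (c :: rest)).drop k := by
        rw [hb]; intro hm
        have := pvBlanks_ge rest (n + 1) n (List.mem_of_mem_drop hm); omega
      have hcongr : ∀ p ∈ PySem.List.enumerate rest (n + 1),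
            (!(PySem.Set.contains (PySem.Set.ofList ((pvBlanks n (c :: rest)).drop k)) p.1))
              = (!(PySem.Set.contains (PySem.Set.ofList ((pvBlanks (n + 1) rest).drop k)) p.1)) := by
        intro p hp; rw [hb]
      rw [PySem.List.enumerate_cons,
        List.filter_cons_of_pos (by simp [PySem.Set.mem_ofList, hnot]),
        List.map_cons, List.filter_congr hcongr, ih (n + 1) k]
      simp [pvKeep, hc]

-- ===== VERDICT (by name: the statement is the Claim_ definition above) =====
theorem limit_blanks_py_spec : Claim_equal_limit_blanks_py := by
  intro tiles mb _
  unfold Spec_limit_blanks_py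
  simp only [limit_blanks_py, limit_blanks_py_alt]
  rw [pvA_eq_keep mb tiles.toList [] 0, pvB_eq_keep tiles.toList 0 (max mb 0).toNat]
  have h : mb.toNat = (max mb 0).toNat := by omega
  simp [h]
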